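-- pv_equiv track=rewrite | github.com/Yiannis128/esbmc | regression/python/github_4510_fail/main.py | f
-- ===== SOURCE A (Python) =====
-- def f(n: int) -> int:
--     h: int = 0
--     result: int = 0
--     while h < 3:
--         x: int
--         if 5 < n:
--             x = 5
--         else:
--             x = n
--         result = result + x
--         h = h + 1
--     return result
-- ===== SOURCE B (Python) =====
-- def f(n: int) -> int:
--     return 3 * (5 if n > 5 else n)
-- ===== Notes on version B (the rewrite author's own statement) =====
-- stated objective: simpler
-- what changed: Replaces the fixed-count accumulation loop with a single closed-form arithmetic expression (triple the capped value).
import Mathlib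
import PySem

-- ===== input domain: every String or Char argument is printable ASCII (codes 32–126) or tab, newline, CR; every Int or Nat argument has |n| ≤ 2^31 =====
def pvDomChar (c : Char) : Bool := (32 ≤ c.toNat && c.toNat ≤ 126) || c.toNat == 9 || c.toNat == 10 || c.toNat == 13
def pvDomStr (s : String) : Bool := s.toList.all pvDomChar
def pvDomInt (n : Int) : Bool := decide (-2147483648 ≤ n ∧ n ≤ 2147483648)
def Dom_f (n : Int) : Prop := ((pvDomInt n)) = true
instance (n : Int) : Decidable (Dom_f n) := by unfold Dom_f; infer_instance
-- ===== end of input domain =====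

-- B replaces the fixed-count accumulation loop with a closed-form arithmetic expression (objective: simpler).

-- ===== PORT A =====
-- the while loop: state (h, result), iterate while h < 3; h counts 0,1,2, so a fold over 3 steps
def fStep (n : Int) (result : Int) : Int :=
  result + (if 5 < n then 5 else n)

def fLoop (n : Int) (h result : Int) : Int :=
  if h < 3 then fLoop n (h + 1) (fStep n result) else result
termination_by (3 - h).toNat
decreasing_by omega

def f (n : Int) : Int := fLoop n 0 0

-- ===== PORT B =====
def f_alt (n : Int) : Int := 3 * (if n > 5 then 5 else n)

-- ===== PRECONDITION & SPEC =====
def Spec_f (n : Int) (out : Int) : Prop := out = f_alt n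
instance (n : Int) (out : Int) : Decidable (Spec_f n out) := by unfold Spec_f; infer_instance

-- ===== CLAIM (what is proved, stated in full; the proofs are below) =====
def Claim_equal_f : Prop := ∀ (n : Int), Dom_f n → Spec_f n (f n)

-- ===== LEMMAS AND PROOFS =====
theorem fLoop_unfold (n h result : Int) :
    fLoop n h result = if h < 3 then fLoop n (h + 1) (fStep n result) else result := by
  rw [fLoop]

-- ===== VERDICT (by name: the statement is the Claim_ definition above) =====
theorem fLoop_val (n : Int) : fLoop n 0 0 = 3 * (if 5 < n then 5 else n) := by
  rw [fLoop_unfold, fLoop_unfold, fLoop_unfold, fLoop_unfold]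
  norm_num [fStep]
  split_ifs <;> ring

theorem f_spec : Claim_equal_f := by
  intro n _
  show f n = f_alt n
  rw [f, fLoop_val, f_alt]
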